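-- pv_equiv track=rewrite | github.com/eduidl/springer-downloader | main.py | get_output_stem
-- ===== SOURCE A (Python) =====
-- def get_output_stem(title: str, author: str) -> str:
--
--     def escape_invalid_char(string: str) -> str:
--         replaces = [(',', '-'), ('.', ''), ('/', ' '), (':', ' ')]
--         out = string
--         for from_, to in replaces:
--             out = out.replace(from_, to)
--         return out
--
--     return f"{escape_invalid_char(title)}-{escape_invalid_char(author)}"
-- ===== SOURCE B (Python) =====
-- def get_output_stem(title: str, author: str) -> str:
--     table = str.maketrans({',': '-', '.': '', '/': ' ', ':': ' '})
--     return f"{title.translate(table)}-{author.translate(table)}"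
-- ===== Notes on version B (the rewrite author's own statement) =====
-- stated objective: idiomatic
-- what changed: Replaces the loop of four sequential str.replace passes with a single str.translate pass over one precomputed translation table (correct because no replacement text contains another source character).
import Mathlib
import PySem

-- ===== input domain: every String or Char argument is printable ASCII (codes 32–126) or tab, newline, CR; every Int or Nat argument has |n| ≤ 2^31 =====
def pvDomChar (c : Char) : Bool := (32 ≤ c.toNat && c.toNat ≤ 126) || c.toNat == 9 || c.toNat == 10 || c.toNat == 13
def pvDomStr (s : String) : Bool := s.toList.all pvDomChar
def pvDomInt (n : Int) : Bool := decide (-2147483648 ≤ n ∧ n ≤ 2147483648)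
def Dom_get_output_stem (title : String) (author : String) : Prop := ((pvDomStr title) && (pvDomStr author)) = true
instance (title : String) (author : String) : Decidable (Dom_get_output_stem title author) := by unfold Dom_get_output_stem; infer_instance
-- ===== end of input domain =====

-- B replaces A's loop of four sequential replace passes by one table-driven per-char pass (str.translate); idiomatic single traversal, same result.


-- ===== PORT A =====
-- escape_invalid_char: fold over the list of (from, to) pairs doing str.replace
def pvEscapeA (string : String) : String :=
  [(",", "-"), (".", ""), ("/", " "), (":", " ")].foldl
    (fun out ft => PySem.Str.replace out ft.1 ft.2) string

def get_output_stem (title : String) (author : String) : String :=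
  pvEscapeA title ++ "-" ++ pvEscapeA author

-- ===== PORT B =====
-- the translation table, applied char by char in a single pass (str.translate)
def pvTable (c : Char) : List Char :=
  if c = ',' then ['-']
  else if c = '.' then []
  else if c = '/' then [' ']
  else if c = ':' then [' ']
  else [c]

def pvEscapeB (string : String) : String :=
  String.ofList (string.toList.flatMap pvTable)

def get_output_stem_alt (title : String) (author : String) : String :=
  pvEscapeB title ++ "-" ++ pvEscapeB author

-- ===== PRECONDITION & SPEC =====
def Spec_get_output_stem (title : String) (author : String) (out : String) : Prop := out = get_output_stem_alt title author
instance (title : String) (author : String) (out : String) : Decidable (Spec_get_output_stem title author out) := by unfold Spec_get_output_stem; infer_instance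

-- ===== CLAIM (what is proved, stated in full; the proofs are below) =====
def Claim_equal_get_output_stem : Prop := ∀ (title : String) (author : String), Dom_get_output_stem title author → Spec_get_output_stem title author (get_output_stem title author)

-- ===== LEMMAS AND PROOFS =====

-- single-char replace is a per-char flatMap
theorem replace_go_single (c : Char) (new : List Char) :
    ∀ (fuel : Nat) (l acc : List Char), l.length ≤ fuel →
      PySem.Chars.replace.go [c] new fuel l acc
        = acc.reverse ++ l.flatMap (fun x => if x = c then new else [x]) := by
  intro fuel
  induction fuel with
  | zero =>
    intro l acc h
    have hl : l = [] := List.eq_nil_of_length_eq_zero (Nat.le_zero.mp h)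
    subst hl
    simp [PySem.Chars.replace.go]
  | succ n ih =>
    intro l acc h
    cases l with
    | nil => simp [PySem.Chars.replace.go]
    | cons x t =>
      have ht : t.length ≤ n := by simpa using Nat.le_of_succ_le_succ h
      by_cases hx : c = x
      · subst hx
        simp [PySem.Chars.replace.go, List.isPrefixOf, ih t _ ht]
      · simp [PySem.Chars.replace.go, List.isPrefixOf, hx, Ne.symm hx, ih t _ ht]

theorem replace_single (s : List Char) (c : Char) (new : List Char) :
    PySem.Chars.replace s [c] new = s.flatMap (fun x => if x = c then new else [x]) := by
  rw [PySem.Chars.replace]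
  simp only [List.isEmpty_cons, if_neg Bool.false_ne_true]
  rw [replace_go_single c new s.length s [] (le_refl _)]
  simp

theorem escape_eq (s : String) : pvEscapeA s = pvEscapeB s := by
  apply String.toList_inj.mp
  simp only [pvEscapeA, pvEscapeB, List.foldl_cons, List.foldl_nil,
    PySem.Str.toList_replace, String.toList_ofList]
  have c1 : (",").toList = [','] := rfl
  have c2 : (".").toList = ['.'] := rfl
  have c3 : ("/").toList = ['/'] := rfl
  have c4 : (":").toList = [':'] := rfl
  have c5 : ("-").toList = ['-'] := rfl
  have c6 : ("").toList = ([] : List Char) := rfl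
  have c7 : (" ").toList = [' '] := rfl
  rw [c1, c2, c3, c4, c5, c6, c7, replace_single, replace_single, replace_single,
    replace_single]
  simp only [List.flatMap_assoc]
  apply List.flatMap_congr
  intro x _
  unfold pvTable
  by_cases h1 : x = ',' <;> by_cases h2 : x = '.' <;> by_cases h3 : x = '/' <;>
    by_cases h4 : x = ':' <;> simp_all

theorem get_output_stem_spec : Claim_equal_get_output_stem := by
  intro title author _
  unfold Spec_get_output_stem get_output_stem get_output_stem_alt
  rw [escape_eq, escape_eq]
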